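-- pv_equiv track=rewrite | github.com/zycdengdeng/proj_utils_pro_Roadside_Generation | intersection_filter/intersection_filter.py | segment_track
-- ===== SOURCE A (Python) =====
-- SEGMENT_LENGTH = 29  # 每个视频片段的帧数
--
-- def segment_track(frames, segment_length=SEGMENT_LENGTH):
--     """
--     将一条轨迹按segment_length分段
--
--     规则：
--     - 帧数 < segment_length: 丢弃
--     - segment_length <= 帧数 < 2*segment_length: 取前segment_length帧
--     - 2*segment_length <= 帧数 < 3*segment_length: 取前2*segment_length帧，分成2段
--     - 以此类推：n = 帧数 // segment_length 段，每段segment_length帧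
--
--     Returns:
--         list of lists, each inner list is a segment of frames
--     """
--     n_frames = len(frames)
--     if n_frames < segment_length:
--         return []
--
--     n_segments = n_frames // segment_length
--     segments = []
--     for i in range(n_segments):
--         start = i * segment_length
--         end = start + segment_length
--         segments.append(frames[start:end])
--
--     return segments
-- ===== SOURCE B (Python) =====
-- SEGMENT_LENGTH = 29
--
-- def segment_track(frames, segment_length=SEGMENT_LENGTH):
--     segments = []
--     buf = []
--     for f in frames:
--         buf.append(f)
--         if len(buf) == segment_length:
--             segments.append(buf)
--             buf = []
--     return segments
-- ===== Notes on version B (the rewrite author's own statement) =====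
-- stated objective: alternative
-- what changed: Replaces computing n_segments by floor division and slicing by index with a single element-wise pass that fills a buffer and emits it each time it reaches segment_length, discarding the incomplete tail.
-- outside the precondition, e.g. on segment_track([1, 2], 0): A raises ZeroDivisionError, B returns []
import Mathlib
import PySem

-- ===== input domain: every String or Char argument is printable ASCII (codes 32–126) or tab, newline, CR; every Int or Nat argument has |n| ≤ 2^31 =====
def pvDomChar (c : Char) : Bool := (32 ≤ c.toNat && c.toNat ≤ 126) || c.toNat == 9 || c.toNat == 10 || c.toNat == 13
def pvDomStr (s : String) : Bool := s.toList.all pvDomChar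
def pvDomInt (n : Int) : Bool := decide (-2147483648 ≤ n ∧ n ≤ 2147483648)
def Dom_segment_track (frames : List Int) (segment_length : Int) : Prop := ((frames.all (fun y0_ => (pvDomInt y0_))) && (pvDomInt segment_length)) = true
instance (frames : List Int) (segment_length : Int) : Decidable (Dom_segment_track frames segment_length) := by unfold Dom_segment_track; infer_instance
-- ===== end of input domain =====

-- B replaces index arithmetic (n//segment_length slices) by a single element-wise
-- buffer-filling pass that emits a segment whenever the buffer reaches segment_length
-- (objective: alternative decomposition, same cost).

-- ===== PORT A =====
def segment_track (frames : List Int) (segment_length : Int) : List (List Int) :=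
  let n_frames : Int := frames.length
  if n_frames < segment_length then []
  else
    let n_segments := PySem.Int.floordiv n_frames segment_length
    (PySem.List.pyRange 0 n_segments 1).foldl
      (fun segments i =>
        let start := i * segment_length
        let stop := start + segment_length
        segments ++ [PySem.List.slice frames (some start) (some stop)]) []

-- ===== PORT B =====
def segment_track_alt (frames : List Int) (segment_length : Int) : List (List Int) :=
  (frames.foldl
    (fun (st : List (List Int) × List Int) f =>
      let buf := st.2 ++ [f]
      if (buf.length : Int) = segment_length then (st.1 ++ [buf], ([] : List Int))
      else (st.1, buf))
    ([], [])).1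

-- ===== PRECONDITION & SPEC =====
-- Pre_ excludes exactly segment_length = 0, where A raises ZeroDivisionError at 'n_frames // segment_length'.
def Pre_segment_track (frames : List Int) (segment_length : Int) : Prop := segment_length ≠ 0
instance (frames : List Int) (segment_length : Int) : Decidable (Pre_segment_track frames segment_length) := by unfold Pre_segment_track; infer_instance
def pvWitness_segment_track : List Int × Int := ([1, 2, 3, 4, 5], 2)

def Spec_segment_track (frames : List Int) (segment_length : Int) (out : List (List Int)) : Prop := out = segment_track_alt frames segment_length
instance (frames : List Int) (segment_length : Int) (out : List (List Int)) : Decidable (Spec_segment_track frames segment_length out) := by unfold Spec_segment_track; infer_instance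

-- ===== CLAIM (what is proved, stated in full; the proofs are below) =====
def Claim_equal_segment_track : Prop := ∀ (frames : List Int) (segment_length : Int), Dom_segment_track frames segment_length → Pre_segment_track frames segment_length → Spec_segment_track frames segment_length (segment_track frames segment_length)

-- ===== LEMMAS AND PROOFS =====

-- reference chunker: greedy fixed-size chunks, incomplete tail dropped
def chunks (seg : Nat) (l : List Int) : List (List Int) :=
  if h : 0 < seg ∧ seg ≤ l.length then
    l.take seg :: chunks seg (l.drop seg)
  else []
  termination_by l.length
  decreasing_by simp; omega

lemma chunks_nil_of_short (seg : Nat) (l : List Int) (h : l.length < seg) :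
    chunks seg l = [] := by
  rw [chunks]; simp; omega

lemma foldl_append_map {α β : Type} (f : α → β) (xs : List α) (init : List β) :
    xs.foldl (fun acc i => acc ++ [f i]) init = init ++ xs.map f := by
  induction xs generalizing init with
  | nil => simp
  | cons x xs ih => simp [List.foldl, ih]

lemma fdiv_nonpos_of_neg (n s : Int) (hn : 0 ≤ n) (hs : s < 0) :
    Int.fdiv n s ≤ 0 := by
  have h : Int.fdiv n (-(-s)) = if (-s) ∣ n then -Int.fdiv n (-s) else -Int.fdiv n (-s) - 1 :=
    Int.fdiv_neg (by omega)
  have h2 : 0 ≤ Int.fdiv n (-s) := Int.fdiv_nonneg hn (by omega)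
  rw [neg_neg] at h
  rw [h]; split_ifs <;> omega

-- B's fold step
def bstep (seg : Int) (st : List (List Int) × List Int) (f : Int) : List (List Int) × List Int :=
  let buf := st.2 ++ [f]
  if (buf.length : Int) = seg then (st.1 ++ [buf], ([] : List Int)) else (st.1, buf)

lemma alt_eq_foldl_bstep (frames : List Int) (seg : Int) :
    segment_track_alt frames seg = (frames.foldl (bstep seg) ([], [])).1 := rfl

lemma foldl_bstep_neg (seg : Int) (hs : seg < 0) (l : List Int)
    (segs : List (List Int)) (buf : List Int) :
    (l.foldl (bstep seg) (segs, buf)).1 = segs := by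
  induction l generalizing buf with
  | nil => rfl
  | cons f l ih =>
      simp only [List.foldl, bstep]
      rw [if_neg (by simp; omega)]
      exact ih _

lemma foldl_bstep_inv (seg : Int) (hs : 0 < seg) (l : List Int)
    (segs : List (List Int)) (buf : List Int) (hb : (buf.length : Int) < seg) :
    (l.foldl (bstep seg) (segs, buf)).1 = segs ++ chunks seg.toNat (buf ++ l) := by
  induction l generalizing segs buf with
  | nil =>
      simp [chunks_nil_of_short seg.toNat buf (by omega)]
  | cons f l ih =>
      simp only [List.foldl, bstep]
      by_cases hfull : ((buf ++ [f]).length : Int) = seg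
      · rw [if_pos hfull]
        rw [ih _ [] (by simpa using hs)]
        have hlen : (buf ++ [f]).length = seg.toNat := by
          simp at hfull ⊢; omega
        have hl : buf ++ f :: l = (buf ++ [f]) ++ l := by simp
        have : chunks seg.toNat (buf ++ f :: l) = (buf ++ [f]) :: chunks seg.toNat l := by
          have hlen' : buf.length + 1 = seg.toNat := by simpa using hlen
          rw [chunks, hl]
          rw [dif_pos (by simp; omega)]
          rw [← hlen, List.take_left, List.drop_left, hlen]
        simp [this]
      · rw [if_neg hfull]
        rw [ih _ (buf ++ [f]) (by simp at hfull ⊢; omega)]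
        simp


lemma slice_shift (l : List Int) (s j : Nat) :
    PySem.List.slice l (some ((1 + (j : Int)) * (s : Int))) (some ((1 + (j : Int)) * (s : Int) + (s : Int)))
      = PySem.List.slice (l.drop s) (some ((0 + (j : Int)) * (s : Int))) (some ((0 + (j : Int)) * (s : Int) + (s : Int))) := by
  have h1 : (1 + (j : Int)) * (s : Int) = (((1 + j) * s : Nat) : Int) := by push_cast; ring
  have h2 : (1 + (j : Int)) * (s : Int) + (s : Int) = (((1 + j) * s + s : Nat) : Int) := by push_cast; ring
  have h3 : (0 + (j : Int)) * (s : Int) = ((j * s : Nat) : Int) := by push_cast; ring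
  have h4 : (0 + (j : Int)) * (s : Int) + (s : Int) = ((j * s + s : Nat) : Int) := by push_cast; ring
  have h2' : (((1 + j) * s : Nat) : Int) + (s : Int) = (((1 + j) * s + s : Nat) : Int) := by push_cast; ring
  have h4' : ((j * s : Nat) : Int) + (s : Int) = ((j * s + s : Nat) : Int) := by push_cast; ring
  rw [h1, h3, h2', h4', PySem.List.slice_natCast, PySem.List.slice_natCast]
  rw [List.drop_drop]
  have e1 : (1 + j) * s + s - (1 + j) * s = s := by simp
  have e2 : j * s + s - j * s = s := by simp
  rw [e1, e2]
  congr 1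
  ring_nf

lemma fdiv_small (a b : Int) (h0 : 0 ≤ a) (h : a < b) : Int.fdiv a b = 0 := by
  rw [Int.fdiv_eq_ediv_of_nonneg _ (by omega)]
  exact Int.ediv_eq_zero_of_lt h0 h

lemma fdiv_sub_self (n s : Int) (hs : s ≠ 0) : Int.fdiv (n - s) s = Int.fdiv n s - 1 := by
  have := Int.add_mul_fdiv_right n (-1) hs
  have he : n + (-1) * s = n - s := by ring
  rw [he] at this
  omega

-- A's slices equal the reference chunker (for positive segment_length)
lemma a_map_eq_chunks (seg : Int) (hs : 0 < seg) (l : List Int) :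
    (PySem.List.pyRange 0 (PySem.Int.floordiv (l.length : Int) seg) 1).map
      (fun i => PySem.List.slice l (some (i * seg)) (some (i * seg + seg)))
      = chunks seg.toNat l := by
  generalize hn : l.length = n
  induction n using Nat.strong_induction_on generalizing l with
  | _ n ih =>
    subst hn
    by_cases hlt : (l.length : Int) < seg
    · have hk : PySem.Int.floordiv (l.length : Int) seg = 0 :=
        fdiv_small _ _ (by omega) hlt
      rw [hk, PySem.List.pyRange_one_eq_nil (by omega), List.map_nil,
        chunks_nil_of_short seg.toNat l (by omega)]
    · -- seg ≤ length
      have hk1 : 1 ≤ PySem.Int.floordiv (l.length : Int) seg := by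
        rw [PySem.Int.le_floordiv_iff_mul_le hs]
        omega
      rw [PySem.List.pyRange_one_cons (by omega), List.map_cons]
      have hhead : PySem.List.slice l (some (0 * seg)) (some (0 * seg + seg))
          = l.take seg.toNat := by
        rw [zero_mul, zero_add, PySem.List.slice_zero_start,
          PySem.List.slice_to l (le_of_lt hs)]
      have hchunks : chunks seg.toNat l
          = l.take seg.toNat :: chunks seg.toNat (l.drop seg.toNat) := by
        rw [chunks, dif_pos (by omega)]
      rw [hhead, hchunks]
      congr 1
      -- tail: shift indices and use IH on l.drop seg.toNat
      have hdroplen : ((l.drop seg.toNat).length : Int) = (l.length : Int) - seg := by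
        simp; omega
      have hkdrop : PySem.Int.floordiv ((l.drop seg.toNat).length : Int) seg
          = PySem.Int.floordiv (l.length : Int) seg - 1 := by
        rw [hdroplen]
        exact fdiv_sub_self _ _ (by omega)
      have ihd := ih (l.drop seg.toNat).length (by simp; omega) (l.drop seg.toNat) rfl
      rw [hkdrop] at ihd
      rw [← ihd]
      rw [PySem.List.pyRange_one, PySem.List.pyRange_one, List.map_map, List.map_map]
      have harg : ((PySem.Int.floordiv (l.length : Int) seg - 1) - 0).toNat
          = (PySem.Int.floordiv (l.length : Int) seg - 1).toNat := by omega
      rw [harg]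
      apply List.map_congr_left
      intro j _
      have hcast : ((seg.toNat : Int)) = seg := Int.toNat_of_nonneg (le_of_lt hs)
      simp only [Function.comp_apply]
      rw [← hcast]
      exact slice_shift l seg.toNat j

-- ===== VERDICT (by name: the statement is the Claim_ definition above) =====
theorem segment_track_spec : Claim_equal_segment_track := by
  intro frames seg _ hpre
  show segment_track frames seg = segment_track_alt frames seg
  rcases lt_trichotomy seg 0 with hneg | hzero | hpos
  · -- negative segment_length: both return []
    rw [alt_eq_foldl_bstep, foldl_bstep_neg seg hneg]
    unfold segment_track
    rw [if_neg (by simp; omega)]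
    have hk : PySem.Int.floordiv (frames.length : Int) seg ≤ 0 :=
      fdiv_nonpos_of_neg _ _ (by omega) hneg
    simp only []
    rw [PySem.List.pyRange_one_eq_nil (by omega)]
    rfl
  · exact absurd hzero hpre
  · -- positive segment_length
    have halt : segment_track_alt frames seg = chunks seg.toNat frames := by
      rw [alt_eq_foldl_bstep, foldl_bstep_inv seg hpos frames [] [] (by simpa using hpos)]
      simp
    rw [halt]
    unfold segment_track
    by_cases hlt : (frames.length : Int) < seg
    · rw [if_pos hlt, chunks_nil_of_short seg.toNat frames (by omega)]
    · rw [if_neg hlt]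
      simp only []
      rw [foldl_append_map (fun i => PySem.List.slice frames (some (i * seg)) (some (i * seg + seg)))]
      rw [List.nil_append]
      exact a_map_eq_chunks seg hpos frames
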